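-- pv_equiv track=rewrite | github.com/gdunc/city_analysis_v2 | city_analysis/map_utils.py | _country_color_map
-- ===== SOURCE A (Python) =====
-- from typing import Dict, Iterable, Optional, Any
--
-- def _country_color_map(countries: Iterable[str]) -> Dict[str, str]:
--     palette = [
--         "red", "blue", "green", "purple", "orange", "darkred", "lightred",
--         "beige", "darkblue", "darkgreen", "cadetblue", "darkpurple", "white",
--         "pink", "lightblue", "lightgreen", "gray", "black", "lightgray",
--     ]
--     unique = [c for c in dict.fromkeys([c or "UNK" for c in countries])]
--     mapping: Dict[str, str] = {}
--     for idx, c in enumerate(unique):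
--         mapping[c] = palette[idx % len(palette)]
--     return mapping
-- ===== SOURCE B (Python) =====
-- from typing import Dict, Iterable
--
-- def _country_color_map(countries: Iterable[str]) -> Dict[str, str]:
--     palette = [
--         "red", "blue", "green", "purple", "orange", "darkred", "lightred",
--         "beige", "darkblue", "darkgreen", "cadetblue", "darkpurple", "white",
--         "pink", "lightblue", "lightgreen", "gray", "black", "lightgray",
--     ]
--     norm = [c or "UNK" for c in countries]
--     keys = sorted(set(norm), key=norm.index)
--     reps = -(-len(keys) // len(palette))
--     return dict(zip(keys, (palette * reps)[:len(keys)]))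
-- ===== Notes on version B (the rewrite author's own statement) =====
-- stated objective: alternative
-- what changed: Instead of A's ordered dedup (dict.fromkeys) followed by an enumerate loop assigning palette[idx % len], B recovers first-occurrence order by sorting set(norm) by each key's first index in the normalized list, tiles the palette by ceiling-division repetitions and slices it to length, and builds the dict with one dict(zip(...)); no enumerate/modulo loop remains.
import Mathlib
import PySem

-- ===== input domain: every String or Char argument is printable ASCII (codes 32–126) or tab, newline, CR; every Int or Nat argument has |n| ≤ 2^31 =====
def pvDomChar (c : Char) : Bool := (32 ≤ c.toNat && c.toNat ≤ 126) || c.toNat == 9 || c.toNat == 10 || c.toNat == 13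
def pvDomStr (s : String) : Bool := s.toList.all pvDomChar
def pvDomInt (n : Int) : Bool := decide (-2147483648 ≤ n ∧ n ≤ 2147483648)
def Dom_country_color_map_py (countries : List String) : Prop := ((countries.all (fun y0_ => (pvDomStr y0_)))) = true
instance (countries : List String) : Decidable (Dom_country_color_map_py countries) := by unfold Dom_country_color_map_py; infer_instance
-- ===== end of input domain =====

-- B rebuilds the map by a different pipeline: sort set(norm) by first index to recover
-- first-occurrence order, tile the palette by ceiling division and slice it, then one
-- dict(zip(...)) — no dedup-then-enumerate loop (objective: alternative).

-- shared constant (the palette literal both Pythons contain)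
def pvPalette : List String :=
  ["red", "blue", "green", "purple", "orange", "darkred", "lightred",
   "beige", "darkblue", "darkgreen", "cadetblue", "darkpurple", "white",
   "pink", "lightblue", "lightgreen", "gray", "black", "lightgray"]

-- ===== PORT A =====
def country_color_map_py (countries : List String) : List (String × String) :=
  let unique := PySem.List.dedup (countries.map (fun c => if c = "" then "UNK" else c))
  let mapping := (PySem.List.enumerate unique 0).foldl
    (fun (d : PySem.Dict String String) p =>
      d.insert p.2 (PySem.List.pyGetD pvPalette (PySem.Int.mod p.1 (pvPalette.length : Int)) ""))
    PySem.Dict.empty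
  mapping.items

-- ===== PORT B =====
def country_color_map_py_alt (countries : List String) : List (String × String) :=
  let norm := countries.map (fun c => if c = "" then "UNK" else c)
  let keys := PySem.List.sorted (PySem.Set.ofList norm)
      (fun k => (PySem.List.index? norm k).getD 0) false
  let reps := -(PySem.Int.floordiv (-(keys.length : Int)) (pvPalette.length : Int))
  let colors := PySem.List.slice (List.flatten (List.replicate reps.toNat pvPalette))
      none (some (keys.length : Int))
  (PySem.Dict.ofList (keys.zip colors)).items

-- ===== PRECONDITION & SPEC =====
def Spec_country_color_map_py (countries : List String) (out : List (String × String)) : Prop := out = country_color_map_py_alt countries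
instance (countries : List String) (out : List (String × String)) : Decidable (Spec_country_color_map_py countries out) := by unfold Spec_country_color_map_py; infer_instance

-- ===== CLAIM (what is proved, stated in full; the proofs are below) =====
def Claim_equal_country_color_map_py : Prop := ∀ (countries : List String), Dom_country_color_map_py countries → Spec_country_color_map_py countries (country_color_map_py countries)

-- ===== LEMMAS AND PROOFS =====

-- proof-only helpers
def pvPal (i : Int) : String :=
  PySem.List.pyGetD pvPalette (PySem.Int.mod i (pvPalette.length : Int)) ""

-- first occurrences of xs that are not in `seen`, in order
def pvDedupFrom (seen : List String) : List String → List String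
  | [] => []
  | x :: xs => if x ∈ seen then pvDedupFrom seen xs else x :: pvDedupFrom (seen ++ [x]) xs

lemma pvFoldAdd (xs : List String) : ∀ seen : List String,
    xs.foldl PySem.Set.add seen = seen ++ pvDedupFrom seen xs := by
  induction xs with
  | nil => intro seen; simp [pvDedupFrom]
  | cons x xs ih =>
    intro seen
    simp only [List.foldl_cons, pvDedupFrom, PySem.Set.add, PySem.Set.contains]
    by_cases hm : x ∈ seen
    · simp [hm, ih]
    · simp [hm, ih, List.append_assoc]

lemma pvDedup_eq (xs : List String) : PySem.List.dedup xs = pvDedupFrom [] xs := by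
  rw [PySem.List.dedup_eq_ofList, PySem.Set.ofList_eq_foldl, pvFoldAdd]
  simp

lemma pvMemDedupFrom {y : String} (xs : List String) : ∀ seen,
    y ∈ pvDedupFrom seen xs → y ∈ xs ∧ y ∉ seen := by
  induction xs with
  | nil => intro seen h; simp [pvDedupFrom] at h
  | cons x xs ih =>
    intro seen h
    simp only [pvDedupFrom] at h
    by_cases hm : x ∈ seen
    · rw [if_pos hm] at h
      rcases ih seen h with ⟨h1, h2⟩
      exact ⟨List.mem_cons_of_mem _ h1, h2⟩
    · rw [if_neg hm] at h
      rcases List.mem_cons.mp h with h | h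
      · exact ⟨by simp [h], h ▸ hm⟩
      · rcases ih _ h with ⟨h1, h2⟩
        simp only [List.mem_append, List.mem_singleton] at h2
        exact ⟨List.mem_cons_of_mem _ h1, fun hy => h2 (Or.inl hy)⟩

-- first-occurrence order: indices in xs are strictly increasing along pvDedupFrom
lemma pvDedupFrom_pairwise (xs : List String) : ∀ seen,
    (pvDedupFrom seen xs).Pairwise (fun a b => xs.idxOf a < xs.idxOf b) := by
  induction xs with
  | nil => intro seen; simp [pvDedupFrom]
  | cons x xs ih =>
    intro seen
    simp only [pvDedupFrom]
    by_cases hm : x ∈ seen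
    · rw [if_pos hm]
      refine ((ih seen).imp_of_mem ?_)
      intro a b ha hb hab
      have hax : a ≠ x := fun h => (pvMemDedupFrom xs seen ha).2 (h ▸ hm)
      have hbx : b ≠ x := fun h => (pvMemDedupFrom xs seen hb).2 (h ▸ hm)
      simpa [List.idxOf_cons, hax, hbx, Ne.symm hax, Ne.symm hbx] using hab
    · rw [if_neg hm]
      refine List.Pairwise.cons ?_ (((ih (seen ++ [x])).imp_of_mem ?_))
      · intro b hb
        have hbx : b ≠ x := by
          have := (pvMemDedupFrom xs (seen ++ [x]) hb).2
          simp only [List.mem_append, List.mem_singleton] at this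
          exact fun h => this (Or.inr h)
        simp [Ne.symm hbx]
      · intro a b ha hb hab
        have hax : a ≠ x := by
          have := (pvMemDedupFrom xs _ ha).2
          simp only [List.mem_append, List.mem_singleton] at this
          exact fun h => this (Or.inr h)
        have hbx : b ≠ x := by
          have := (pvMemDedupFrom xs _ hb).2
          simp only [List.mem_append, List.mem_singleton] at this
          exact fun h => this (Or.inr h)
        simpa [List.idxOf_cons, hax, hbx, Ne.symm hax, Ne.symm hbx] using hab

lemma pvDedup_pairwise_idx (xs : List String) :
    (PySem.List.dedup xs).Pairwise (fun a b => xs.idxOf a < xs.idxOf b) := by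
  rw [pvDedup_eq]; exact pvDedupFrom_pairwise xs []

-- norm.index of a member, as B's sort key computes it
lemma pvKey (norm : List String) (a : String) (h : a ∈ norm) :
    (PySem.List.index? norm a).getD 0 = norm.idxOf a := by
  rw [PySem.List.index?_eq_idxOf?]
  cases hidx : List.idxOf? a norm with
  | none => exact absurd h (by simpa using List.idxOf?_eq_none_iff.mp hidx)
  | some i => rw [List.idxOf_eq_getD_idxOf?, hidx]; rfl

-- B's sorted(set(norm), key=norm.index) IS the ordered dedup
lemma pvSorted_eq_dedup (norm : List String) :
    PySem.List.sorted (PySem.Set.ofList norm)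
      (fun k => (PySem.List.index? norm k).getD 0) false = PySem.List.dedup norm := by
  apply PySem.List.sorted_eq_of_perm_of_pairwise_lt
  · rw [PySem.List.dedup_eq_ofList]
  · refine (pvDedup_pairwise_idx norm).imp_of_mem ?_
    intro a b ha hb hab
    rw [pvKey norm a ((PySem.List.mem_dedup norm a).mp ha),
        pvKey norm b ((PySem.List.mem_dedup norm b).mp hb)]
    exact hab

-- tiled palette indexing: (palette * R)[i] = palette[i % 19]
lemma pvFlatRep_get : ∀ (R i : Nat), i < R * 19 →
    (List.flatten (List.replicate R pvPalette))[i]? = pvPalette[i % 19]? := by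
  intro R
  induction R with
  | zero => intro i h; omega
  | succ n ih =>
    intro i h
    have hlen : pvPalette.length = 19 := rfl
    rw [List.replicate_succ, List.flatten_cons]
    by_cases hi : i < 19
    · rw [List.getElem?_append_left (show i < pvPalette.length by omega),
          Nat.mod_eq_of_lt hi]
    · rw [List.getElem?_append_right (show pvPalette.length ≤ i by omega), hlen,
          ih (i - 19) (by omega)]
      conv_rhs => rw [Nat.mod_eq_sub_mod (by omega)]

lemma pvA_items (ys : List String) :
    ((PySem.List.enumerate (PySem.List.dedup ys) 0).foldl
      (fun (d : PySem.Dict String String) p =>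
        d.insert p.2 (PySem.List.pyGetD pvPalette (PySem.Int.mod p.1 (pvPalette.length : Int)) ""))
      PySem.Dict.empty).items
    = (PySem.List.enumerate (PySem.List.dedup ys) 0).map (fun p => (p.2, pvPal p.1)) := by
  have := PySem.Dict.items_foldl_insert_fresh
    (l := PySem.List.enumerate (PySem.List.dedup ys) 0)
    (k := fun p => p.2) (v := fun p => pvPal p.1)
    (d := (PySem.Dict.empty : PySem.Dict String String))
    (by intro a _; simp [PySem.Dict.contains_empty])
    (by rw [PySem.List.map_snd_enumerate]; exact PySem.List.nodup_dedup ys)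
  simpa [pvPal] using this

-- B's dict(zip(keys, colors)) lists exactly the zipped pairs (keys are nodup)
lemma pvB_items (keys colors : List String) (hn : keys.Nodup)
    (hl : keys.length ≤ colors.length) :
    (PySem.Dict.ofList (keys.zip colors)).items = keys.zip colors := by
  have hofl : (PySem.Dict.ofList (keys.zip colors) : PySem.Dict String String)
      = (keys.zip colors).foldl (fun d p => d.insert p.1 p.2) PySem.Dict.empty := rfl
  rw [hofl]
  have := PySem.Dict.items_foldl_insert_fresh
    (l := keys.zip colors) (k := fun p => p.1) (v := fun p => p.2)
    (d := (PySem.Dict.empty : PySem.Dict String String))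
    (by intro a _; simp [PySem.Dict.contains_empty])
    (by
      rw [show (fun p : String × String => p.1) = Prod.fst from rfl, List.map_fst_zip hl]
      exact hn)
  simpa using this

-- ===== VERDICT (by name: the statement is the Claim_ definition above) =====
theorem country_color_map_py_spec : Claim_equal_country_color_map_py := by
  intro countries _
  unfold Spec_country_color_map_py
  simp only [country_color_map_py, country_color_map_py_alt]
  rw [pvSorted_eq_dedup, pvA_items]
  set norm := countries.map (fun c => if c = "" then "UNK" else c) with hnorm
  set u := PySem.List.dedup norm with hu
  set n := u.length with hn
  -- the repetition count covers all of u
  set q : Int := -(PySem.Int.floordiv (-(n : Int)) (pvPalette.length : Int)) with hq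
  have h19 : (pvPalette.length : Int) = 19 := by rfl
  have hqb : ((q - 1) * 19 < (n : Int)) ∧ ((n : Int) ≤ q * 19) := by
    have := (PySem.Int.neg_floordiv_neg_eq_iff_of_pos
      (a := (n : Int)) (b := 19) (q := q) (by norm_num)).mp (by rw [hq, h19])
    exact this
  have hcover : n ≤ q.toNat * 19 := by
    rcases hqb with ⟨h1, h2⟩
    have hq0 : 0 ≤ q := by nlinarith [Int.natCast_nonneg n]
    have : (n : Int) ≤ (q.toNat : Int) * 19 := by rwa [Int.toNat_of_nonneg hq0]
    exact_mod_cast this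
  -- colors is the first n entries of the tiled palette
  have hslice : PySem.List.slice (List.flatten (List.replicate q.toNat pvPalette))
      none (some (n : Int)) = (List.flatten (List.replicate q.toNat pvPalette)).take n := by
    rw [PySem.List.slice_to _ (Int.natCast_nonneg n)]; simp
  rw [hslice]
  set flat := List.flatten (List.replicate q.toNat pvPalette) with hflat
  have hflatlen : flat.length = q.toNat * 19 := by
    simp [hflat, List.length_flatten, pvPalette]
  rw [pvB_items u (flat.take n) (PySem.List.nodup_dedup norm)
      (by rw [List.length_take, hflatlen]; omega)]
  -- elementwise equality
  apply List.ext_getElem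
  · simp [PySem.List.length_enumerate, List.length_take, hflatlen]
    omega
  · intro i hi1 hi2
    have hiu : i < u.length := by simpa [PySem.List.length_enumerate] using hi1
    rw [List.getElem_map, List.getElem_zip, PySem.List.getElem_enumerate, List.getElem_take]
    have hif : i < flat.length := by rw [hflatlen]; omega
    have hmod : i % 19 < 19 := Nat.mod_lt _ (by norm_num)
    have hfr := pvFlatRep_get q.toNat i (by omega)
    rw [List.getElem?_eq_getElem hif, List.getElem?_eq_getElem (by simpa [pvPalette] using hmod)] at hfr
    have hflati : flat[i] = pvPal ((0 : Int) + i) := by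
      rw [Option.some_inj.mp hfr]
      simp only [pvPal, zero_add]
      rw [show ((pvPalette.length : Int)) = ((19 : Nat) : Int) from rfl, PySem.Int.mod_natCast,
          PySem.List.pyGetD_natCast]
      rw [List.getD_eq_getElem _ _ (by simpa [pvPalette] using hmod)]
    rw [hflati]
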